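-- pv_equiv track=rewrite | github.com/created-by-varun/Google-foobar-Challenge | level2/solution.py | generous
-- ===== SOURCE A (Python) =====
-- def generous(total_lambs):
--     num = 1
--     last = 0
--     cur = 1
--     total_lambs -= 1
--     while total_lambs > 0:
--         if total_lambs < cur * 2:
--             if total_lambs >= cur + last:
--                 num += 1
--             break
--         num += 1
--         cur, last = cur * 2, cur
--         total_lambs -= cur
--
--     return num
-- ===== SOURCE B (Python) =====
-- def generous(total_lambs):
--     t = total_lambs - 1
--     if t <= 0:
--         return 1
--     m = (t + 2).bit_length() - 2
--     cur = 1 << m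
--     last = cur >> 1
--     r = t - (2 * cur - 2)
--     return 1 + m + (1 if r >= cur + last else 0)
-- ===== Notes on version B (the rewrite author's own statement) =====
-- stated objective: faster
-- what changed: Replaces the O(log n) doubling-subtraction loop with a closed-form bit_length computation of the number of full doubling steps plus a single tie-break comparison.
import Mathlib
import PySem

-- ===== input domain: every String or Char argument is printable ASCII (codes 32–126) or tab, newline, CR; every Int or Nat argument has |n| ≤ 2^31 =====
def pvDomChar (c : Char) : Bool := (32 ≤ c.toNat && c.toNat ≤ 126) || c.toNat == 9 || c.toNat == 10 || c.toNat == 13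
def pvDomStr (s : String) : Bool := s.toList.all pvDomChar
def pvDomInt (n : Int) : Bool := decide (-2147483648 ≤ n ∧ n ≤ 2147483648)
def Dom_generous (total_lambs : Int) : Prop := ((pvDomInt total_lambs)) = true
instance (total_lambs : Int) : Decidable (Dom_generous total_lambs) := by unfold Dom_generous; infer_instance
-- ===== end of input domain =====

-- B replaces A's doubling-subtraction loop by a closed-form bit_length count (faster: O(1) arithmetic instead of a loop).

-- ===== PORT A =====
-- A's while loop, step for step; the state is (num, last, cur, total_lambs).
-- `hc : 0 < cur` is only a termination witness (cur is 1 at entry and only doubles);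
-- it carries no computational content.
def generousLoop (num last cur t : Int) (hc : 0 < cur) : Int :=
  if h : 0 < t then
    if t < cur * 2 then
      if cur + last ≤ t then num + 1 else num
    else
      generousLoop (num + 1) cur (cur * 2) (t - cur * 2) (by positivity)
  else num
termination_by t.toNat
decreasing_by omega

def generous (total_lambs : Int) : Int :=
  generousLoop 1 0 1 (total_lambs - 1) (by norm_num)

-- ===== PORT B =====
-- Source B step for step; Python's (t+2).bit_length() for t+2 ≥ 1 is Nat.log2 (t+2) + 1,
-- `1 << m` is 2^m and `cur >> 1` on a nonnegative int is cur / 2 (exact here).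
def generous_alt (total_lambs : Int) : Int :=
  let t := total_lambs - 1
  if t ≤ 0 then 1
  else
    let m : Nat := (t + 2).toNat.log2 + 1 - 2
    let cur : Int := 2 ^ m
    let last : Int := cur / 2
    let r : Int := t - (2 * cur - 2)
    1 + m + (if cur + last ≤ r then 1 else 0)

-- ===== PRECONDITION & SPEC =====
def Spec_generous (total_lambs : Int) (out : Int) : Prop := out = generous_alt total_lambs
instance (total_lambs : Int) (out : Int) : Decidable (Spec_generous total_lambs out) := by unfold Spec_generous; infer_instance

-- ===== CLAIM (what is proved, stated in full; the proofs are below) =====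
def Claim_equal_generous : Prop := ∀ (total_lambs : Int), Dom_generous total_lambs → Spec_generous total_lambs (generous total_lambs)

-- ===== LEMMAS AND PROOFS =====

-- the value of `last` at doubling stage m of A's loop
def lastOf (m : Nat) : Int := if m = 0 then 0 else 2 ^ (m - 1)

theorem log2_unique {n k : Nat} (hn : n ≠ 0) (h1 : 2 ^ k ≤ n) (h2 : n < 2 ^ (k + 1)) :
    Nat.log2 n = k := by
  have ha := (Nat.le_log2 hn).mpr h1
  have hb := (Nat.log2_lt hn).mpr h2
  omega

theorem log2_unique' {u : Int} {k : Nat} (h1 : (2 : Int) ^ k ≤ u) (h2 : u < 2 ^ (k + 1)) :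
    (u.toNat).log2 = k := by
  have hp : (0 : Int) < 2 ^ k := by positivity
  apply log2_unique
  · have := @Int.toNat_of_nonneg u (by omega); omega
  · have h3 : ((2 ^ k : Nat) : Int) = 2 ^ k := by push_cast; ring
    have := @Int.toNat_of_nonneg u (by omega); omega
  · have h3 : ((2 ^ (k + 1) : Nat) : Int) = 2 ^ (k + 1) := by push_cast; ring
    have := @Int.toNat_of_nonneg u (by omega); omega

theorem loop_congr (num last last' cur cur' t : Int) (h : 0 < cur) (h' : 0 < cur')
    (e1 : last = last') (e2 : cur = cur') :
    generousLoop num last cur t h = generousLoop num last' cur' t h' := by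
  subst e1; subst e2; rfl

-- galt on a positive "t" argument, unfolded
theorem galt_pos (t : Int) (ht : 1 ≤ t) :
    generous_alt (t + 1) =
      1 + ((t + 2).toNat.log2 + 1 - 2 : Nat) +
        (if (2 : Int) ^ ((t + 2).toNat.log2 + 1 - 2 : Nat) +
            (2 : Int) ^ ((t + 2).toNat.log2 + 1 - 2 : Nat) / 2 ≤
            t - (2 * 2 ^ ((t + 2).toNat.log2 + 1 - 2 : Nat) - 2) then 1 else 0) := by
  unfold generous_alt
  have h : ¬ (t + 1 - 1 ≤ 0) := by omega
  simp only [h, if_false]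
  norm_num

-- main loop invariant: at stage m (cur = 2^m, last = lastOf m) with remaining t ≥ 1,
-- A's loop computes num - 1 - m plus B's closed form at the corresponding original input
theorem loop_eq_alt : ∀ (n : Nat) (t : Int), t.toNat ≤ n → 1 ≤ t →
    ∀ (m : Nat) (num : Int) (hc : 0 < (2 : Int) ^ m),
    generousLoop num (lastOf m) (2 ^ m) t hc =
      num + generous_alt (t + 2 ^ (m + 1) - 2 + 1) - 1 - m := by
  intro n
  induction n with
  | zero => intro t hle ht; omega
  | succ n ih =>
    intro t hle ht m num hc
    have hpow : (1 : Int) ≤ 2 ^ m := hc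
    have hpow1 : (2 : Int) ^ (m + 1) = 2 * 2 ^ m := by ring
    rw [generousLoop]
    have hpos : 0 < t := by omega
    rw [dif_pos hpos]
    by_cases hlt : t < 2 ^ m * 2
    · -- loop exits here: B's bit_length count lands on exactly this stage m
      rw [if_pos hlt]
      have hL : ((t + 2 ^ (m + 1) - 2 + 2).toNat).log2 = m + 1 := by
        apply log2_unique' <;>
          · have h2 : (2 : Int) ^ (m + 1 + 1) = 4 * 2 ^ m := by ring
            omega
      rw [galt_pos _ (by omega), hL]
      have hm : (m + 1 + 1 - 2 : Nat) = m := by omega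
      rw [hm]
      have hr : t + 2 ^ (m + 1) - 2 - (2 * 2 ^ m - 2) = t := by rw [hpow1]; ring
      rw [hr]
      have hlast : (2 : Int) ^ m / 2 = lastOf m := by
        cases m with
        | zero => simp [lastOf]
        | succ k =>
          simp only [lastOf, Nat.succ_ne_zero, if_false, Nat.add_sub_cancel]
          rw [pow_succ]
          omega
      rw [hlast]
      by_cases htie : 2 ^ m + lastOf m ≤ t
      · rw [if_pos htie, if_pos htie]; ring
      · rw [if_neg htie, if_neg htie]; ring
    · -- loop takes a full step to stage m+1
      rw [if_neg hlt]
      have hge : 2 ^ m * 2 ≤ t := by omega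
      by_cases hz : 1 ≤ t - 2 ^ m * 2
      · have harg : (t - 2 ^ m * 2).toNat ≤ n := by omega
        have hc' : 0 < (2 : Int) ^ (m + 1) := by positivity
        have e1 : (2 : Int) ^ m * 2 = 2 ^ (m + 1) := by ring
        have e2 : (2 : Int) ^ m = lastOf (m + 1) := by simp [lastOf]
        rw [loop_congr (num + 1) (2 ^ m) (lastOf (m + 1)) (2 ^ m * 2) (2 ^ (m + 1))
              (t - 2 ^ m * 2) (by positivity) hc' e2 e1]
        rw [ih _ harg hz (m + 1) (num + 1) hc']
        have e3 : (t - 2 ^ m * 2) + 2 ^ (m + 1 + 1) - 2 + 1 = t + 2 ^ (m + 1) - 2 + 1 := by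
          have h4 : (2 : Int) ^ (m + 1 + 1) = 2 * (2 ^ m * 2) := by ring
          omega
        rw [e3]; push_cast; ring
      · -- t = 2^(m+1) exactly: the next loop test fails, result num + 1
        have hteq : t = 2 ^ m * 2 := by omega
        rw [generousLoop]
        have hng : ¬ (0 : Int) < t - 2 ^ m * 2 := by omega
        rw [dif_neg hng]
        have hL : ((t + 2 ^ (m + 1) - 2 + 2).toNat).log2 = m + 2 := by
          apply log2_unique' <;>
            · have h2 : (2 : Int) ^ (m + 2) = 4 * 2 ^ m := by ring
              have h3 : (2 : Int) ^ (m + 2 + 1) = 8 * 2 ^ m := by ring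
              omega
        rw [galt_pos _ (by omega), hL]
        have hm : (m + 2 + 1 - 2 : Nat) = m + 1 := by omega
        rw [hm]
        have htie : ¬ ((2 : Int) ^ (m + 1) + 2 ^ (m + 1) / 2 ≤
            t + 2 ^ (m + 1) - 2 - (2 * 2 ^ (m + 1) - 2)) := by
          have h5 : (0 : Int) ≤ 2 ^ (m + 1) / 2 := by positivity
          omega
        rw [if_neg htie]
        push_cast; ring

-- ===== VERDICT (by name: the statement is the Claim_ definition above) =====
theorem generous_spec : Claim_equal_generous := by
  intro total_lambs _
  unfold Spec_generous generous
  by_cases h : 1 ≤ total_lambs - 1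
  · have := loop_eq_alt (total_lambs - 1).toNat (total_lambs - 1) le_rfl h 0 1 (by norm_num)
    simp only [pow_zero] at this
    have e : total_lambs - 1 + 2 ^ (0 + 1) - 2 + 1 = total_lambs := by norm_num
    rw [e] at this
    have hl : lastOf 0 = 0 := rfl
    rw [hl] at this
    rw [this]; push_cast; ring
  · rw [generousLoop]
    have h1 : ¬ (0 : Int) < total_lambs - 1 := by omega
    rw [dif_neg h1]
    unfold generous_alt
    have h2 : total_lambs - 1 ≤ 0 := by omega
    simp [h2]
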